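-- pv_equiv track=rewrite | github.com/Jerry-ZhaoTy/Intro-to-AI | nqueens.py | choose_next
-- ===== SOURCE A (Python) =====
-- def succ(state, static_x, static_y):
--     if state[static_x] != static_y:  # check whether a queen is on static point
--         return []
--     succList = []
--     for i in range (0, len(state)):
--         if i == static_x:
--             continue
--         succ1 = state.copy()
--         succ2 = state.copy()
--         if succ1[i]+1 != len(state): # check whether a move will excess the bound
--             succ1[i] += 1
--             succList.append(succ1)   # check whether a move will excess the bound
--         if succ2[i]-1 != -1:
--             succ2[i] -= 1
--             succList.append(succ2)
--     succList.sort()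
--     return succList
--
-- def f(state):
--     f = 0
--     for i in range (0, len(state)):
--         for j in range (0, len(state)):
--             if i == j:
--                 continue
--             if abs(state[i]-state[j]) == abs(i-j) or state[i] == state[j]:
--                 f += 1
--                 break
--     return f
--
-- def choose_next(curr, static_x, static_y):
--     if curr[static_x] != static_y:  # check whether a queen is on static point
--         return None
--     succList = succ(curr, static_x, static_y)
--     succList.append(curr)
--     succList.sort()
--     fList = []
--     fList.append([succList[0],f(succList[0])])
--     for i in range (1, len(succList)):   # find the succ with smallest f
--         if f(succList[i]) < fList[0][1]:
--             fList.insert(0,[succList[i],f(succList[i])])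
--     return fList[0][0]
-- ===== SOURCE B (Python) =====
-- def choose_next(curr, static_x, static_y):
--     if curr[static_x] != static_y:  # a queen must sit on the static point
--         return None
--     n = len(curr)
--
--     def conflict(vi, i, vj, j):
--         return vi == vj or abs(vi - vj) == abs(i - j)
--
--     # conflict count of each row in the current state, computed once
--     c = [sum(1 for j in range(n) if j != i and conflict(curr[i], i, curr[j], j))
--          for i in range(n)]
--     best = curr
--     best_f = sum(1 for x in c if x > 0)
--
--     for i in range(n):
--         if i == static_x:
--             continue
--         for v, bound in ((curr[i] + 1, n), (curr[i] - 1, -1)):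
--             if v == bound:  # move would leave the board
--                 continue
--             # f of the successor: each remaining row's count adjusted by the two affected pair terms
--             fi = 0
--             ci = 0
--             for k in range(n):
--                 if k == i:
--                     continue
--                 ck = c[k] - conflict(curr[k], k, curr[i], i) + conflict(curr[k], k, v, i)
--                 if ck > 0:
--                     fi += 1
--                 if conflict(v, i, curr[k], k):
--                     ci += 1
--             if ci > 0:
--                 fi += 1
--             cand = curr.copy()
--             cand[i] = v
--             if fi < best_f or (fi == best_f and cand < best):
--                 best, best_f = cand, fi
--     return best
-- ===== Notes on version B (the rewrite author's own statement) =====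
-- stated objective: alternative
-- what changed: B computes each row's conflict count once for the current board and scores every single-queen move by an incremental per-row update of those counts, selecting the (f, board)-lexicographic minimum in one pass, instead of A's generate-sort-rescan that recomputes the full pairwise conflict function for every candidate.
import Mathlib
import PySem

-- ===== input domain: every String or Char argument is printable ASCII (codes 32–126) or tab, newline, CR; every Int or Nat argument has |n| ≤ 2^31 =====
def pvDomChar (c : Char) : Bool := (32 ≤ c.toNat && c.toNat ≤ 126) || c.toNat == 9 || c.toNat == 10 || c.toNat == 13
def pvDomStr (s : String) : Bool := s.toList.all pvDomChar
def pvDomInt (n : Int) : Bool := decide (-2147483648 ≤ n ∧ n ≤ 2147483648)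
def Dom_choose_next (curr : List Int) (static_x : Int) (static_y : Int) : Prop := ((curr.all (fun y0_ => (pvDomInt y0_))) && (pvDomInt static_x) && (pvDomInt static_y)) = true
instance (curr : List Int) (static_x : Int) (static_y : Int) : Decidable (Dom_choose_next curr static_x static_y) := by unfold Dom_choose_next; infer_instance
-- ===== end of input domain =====

-- B precomputes every row's conflict count once and scores each single-queen move by an
-- incremental per-row count update, taking the minimum in a single pass instead of A's
-- sort-and-rescan with a full conflict recount per candidate (objective: alternative).

-- ===== PORT A =====
-- helper `succ`: every non-static queen moved one row up / one row down, then sorted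
def succ_py (state : List Int) (static_x : Int) (static_y : Int) : List (List Int) :=
  match PySem.List.pyGet? state static_x with
  | none => []
  | some v =>
    if v ≠ static_y then []
    else
      let succList := (PySem.List.pyRange 0 state.length 1).foldl (fun acc i =>
        if i == static_x then acc
        else
          let acc := if PySem.List.pyGetD state i 0 + 1 ≠ (state.length : Int)
                     then acc ++ [PySem.List.pySetD state i (PySem.List.pyGetD state i 0 + 1)]
                     else acc
          if PySem.List.pyGetD state i 0 - 1 ≠ -1
          then acc ++ [PySem.List.pySetD state i (PySem.List.pyGetD state i 0 - 1)]
          else acc) []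
      PySem.List.sorted succList (fun x => x)

-- helper `f`: the inner j-loop breaks after the first conflict, so row i contributes
-- exactly 1 iff some j ≠ i conflicts with it; the break-loop is ported as `any`
def f_py (state : List Int) : Int :=
  (PySem.List.pyRange 0 state.length 1).foldl (fun f i =>
    if (PySem.List.pyRange 0 state.length 1).any (fun j =>
        j != i &&
        ((PySem.List.pyGetD state i 0 - PySem.List.pyGetD state j 0).natAbs == (i - j).natAbs
         || PySem.List.pyGetD state i 0 == PySem.List.pyGetD state j 0))
    then f + 1 else f) 0

def choose_next (curr : List Int) (static_x : Int) (static_y : Int) : Option (List Int) :=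
  match PySem.List.pyGet? curr static_x with
  | none => none
  | some v =>
    if v ≠ static_y then none
    else
      let succList := succ_py curr static_x static_y
      let succList := PySem.List.sorted (succList ++ [curr]) (fun x => x)
      let fList : List (List Int × Int) :=
        [(PySem.List.pyGetD succList 0 [], f_py (PySem.List.pyGetD succList 0 []))]
      let fList := (PySem.List.pyRange 1 succList.length 1).foldl (fun fl i =>
        if f_py (PySem.List.pyGetD succList i []) < (PySem.List.pyGetD fl 0 ([], 0)).2
        then (PySem.List.pyGetD succList i [], f_py (PySem.List.pyGetD succList i [])) :: fl
        else fl) fList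
      some (PySem.List.pyGetD fList 0 ([], 0)).1

-- ===== PORT B =====
def conflict_alt (vi i vj j : Int) : Bool :=
  vi == vj || (vi - vj).natAbs == (i - j).natAbs

-- f of the successor with queen i moved to row v: each other row's conflict count c[k]
-- is adjusted by the two affected pair terms, the moved row's count is rebuilt
def fmove (curr : List Int) (c : List Int) (i v : Int) : Int :=
  let p := (PySem.List.pyRange 0 curr.length 1).foldl (fun (p : Int × Int) k =>
    if k == i then p
    else
      let ck := PySem.List.pyGetD c k 0
                - (if conflict_alt (PySem.List.pyGetD curr k 0) k (PySem.List.pyGetD curr i 0) i then 1 else 0)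
                + (if conflict_alt (PySem.List.pyGetD curr k 0) k v i then 1 else 0)
      ((if 0 < ck then p.1 + 1 else p.1),
       (if conflict_alt v i (PySem.List.pyGetD curr k 0) k then p.2 + 1 else p.2))) (0, 0)
  if 0 < p.2 then p.1 + 1 else p.1

def choose_next_alt (curr : List Int) (static_x : Int) (static_y : Int) : Option (List Int) :=
  match PySem.List.pyGet? curr static_x with
  | none => none
  | some v0 =>
    if v0 ≠ static_y then none
    else
      let n : Int := curr.length
      let c : List Int := (PySem.List.pyRange 0 n 1).map (fun i =>
        ((PySem.List.pyRange 0 n 1).countP (fun j =>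
          j != i && conflict_alt (PySem.List.pyGetD curr i 0) i (PySem.List.pyGetD curr j 0) j) : Int))
      let best := (PySem.List.pyRange 0 n 1).foldl (fun (best : List Int × Int) i =>
        if i == static_x then best
        else
          [(PySem.List.pyGetD curr i 0 + 1, n), (PySem.List.pyGetD curr i 0 - 1, (-1 : Int))].foldl
            (fun best vb =>
              if vb.1 == vb.2 then best
              else
                let fi := fmove curr c i vb.1
                let cand := PySem.List.pySetD curr i vb.1
                if fi < best.2 || (fi == best.2 && decide (cand < best.1)) then (cand, fi)
                else best)
            best)
        (curr, (c.countP (fun x => decide (0 < x)) : Int))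
      some best.1

-- ===== PRECONDITION & SPEC =====
-- Pre_ excludes exactly the inputs on which Python's curr[static_x] raises IndexError
def Pre_choose_next (curr : List Int) (static_x : Int) (static_y : Int) : Prop :=
  -(curr.length : Int) ≤ static_x ∧ static_x < curr.length
instance (curr : List Int) (static_x : Int) (static_y : Int) : Decidable (Pre_choose_next curr static_x static_y) := by unfold Pre_choose_next; infer_instance

def pvWitness_choose_next : List Int × Int × Int := ([1, 0, 2], 0, 1)

def Spec_choose_next (curr : List Int) (static_x : Int) (static_y : Int) (out : Option (List Int)) : Prop := out = choose_next_alt curr static_x static_y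
instance (curr : List Int) (static_x : Int) (static_y : Int) (out : Option (List Int)) : Decidable (Spec_choose_next curr static_x static_y out) := by unfold Spec_choose_next; infer_instance

-- ===== CLAIM (what is proved, stated in full; the proofs are below) =====
def Claim_equal_choose_next : Prop := ∀ (curr : List Int) (static_x : Int) (static_y : Int), Dom_choose_next curr static_x static_y → Pre_choose_next curr static_x static_y → Spec_choose_next curr static_x static_y (choose_next curr static_x static_y)

-- ===== LEMMAS AND PROOFS =====

def confN (s : List Int) (i j : Nat) : Bool := conflict_alt (s.getD i 0) i (s.getD j 0) j

def rowc (s : List Int) (i : Nat) : Int :=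
  ((List.range s.length).countP (fun j => decide (j ≠ i) && confN s i j) : Int)

def flagb (s : List Int) (i : Nat) : Bool := decide (0 < rowc s i)

def FF (s : List Int) : Int := ((List.range s.length).countP (flagb s) : Int)

lemma countP_update (l : List Nat) (i : Nat) (p q : Nat → Bool)
    (h : ∀ j, j ≠ i → p j = q j) (hi : i ∈ l) (hnd : l.Nodup) :
    (l.countP p : Int) =
      (l.countP q : Int) + (if p i then 1 else 0) - (if q i then 1 else 0) := by
  induction l with
  | nil => simp at hi
  | cons a l ih =>
    rcases List.nodup_cons.mp hnd with ⟨ha, hnd'⟩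
    by_cases hai : a = i
    · subst hai
      have hl : l.countP p = l.countP q :=
        List.countP_congr (fun j hj => by rw [h j (fun e => ha (e ▸ hj))])
      simp only [List.countP_cons, hl]
      push_cast
      by_cases hp : p a = true <;> by_cases hq : q a = true <;> simp [hp, hq] <;> ring
    · have hi' : i ∈ l := by
        rcases List.mem_cons.mp hi with e | h'
        · exact absurd e.symm hai
        · exact h'
      have := ih hi' hnd'
      simp only [List.countP_cons, h a hai]
      push_cast
      push_cast at this
      by_cases hq : q a = true <;> simp [hq] at this ⊢ <;> omega

lemma countP_split (l : List Nat) (i : Nat) (p : Nat → Bool) (hi : i ∈ l) (hnd : l.Nodup) :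
    (l.countP p : Int) =
      (l.countP (fun k => decide (k ≠ i) && p k) : Int) + (if p i then 1 else 0) := by
  have := countP_update l i p (fun k => decide (k ≠ i) && p k)
    (fun j hj => by simp [hj]) hi hnd
  simpa using this

lemma getD_set_ne (s : List Int) (i j : Nat) (v : Int) (h : i ≠ j) :
    (s.set i v).getD j 0 = s.getD j 0 := by
  simp [List.getD_eq_getElem?_getD, List.getElem?_set_ne h]

lemma getD_set_self (s : List Int) (i : Nat) (v : Int) (h : i < s.length) :
    (s.set i v).getD i 0 = v := by
  simp [List.getD_eq_getElem?_getD, List.getElem?_set_self h]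

lemma rowc_set_ne (s : List Int) (i k : Nat) (v : Int) (hik : k ≠ i)
    (hi : i < s.length) (hk : k < s.length) :
    rowc (s.set i v) k =
      rowc s k - (if confN s k i then 1 else 0)
        + (if conflict_alt (s.getD k 0) k v i then 1 else 0) := by
  unfold rowc
  rw [List.length_set]
  have h : ∀ j, j ≠ i →
      (fun j => decide (j ≠ k) && confN (s.set i v) k j) j =
      (fun j => decide (j ≠ k) && confN s k j) j := by
    intro j hj
    simp only [confN, getD_set_ne s i j v (fun e => hj e.symm),
      getD_set_ne s i k v (fun e => hik e.symm)]
  have := countP_update (List.range s.length) i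
    (fun j => decide (j ≠ k) && confN (s.set i v) k j)
    (fun j => decide (j ≠ k) && confN s k j) h
    (List.mem_range.mpr hi) (List.nodup_range)
  have e1 : confN (s.set i v) k i = conflict_alt (s.getD k 0) k v i := by
    simp only [confN, getD_set_self s i v hi, getD_set_ne s i k v (fun e => hik e.symm)]
  have hki : i ≠ k := fun e => hik e.symm
  rw [this]
  simp only [e1, hki, ne_eq, not_false_iff, decide_true, Bool.true_and]
  by_cases h1 : confN s k i = true <;>
    by_cases h2 : conflict_alt (s.getD k 0) k v i = true <;> simp [h1, h2] <;> ring

lemma rowc_set_self (s : List Int) (i : Nat) (v : Int) (hi : i < s.length) :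
    rowc (s.set i v) i =
      ((List.range s.length).countP
        (fun k => decide (k ≠ i) && conflict_alt v i (s.getD k 0) k) : Int) := by
  unfold rowc
  rw [List.length_set]
  congr 1
  apply List.countP_congr
  intro j hj
  by_cases hji : j = i
  · simp [hji]
  · simp only [confN, getD_set_self s i v hi, getD_set_ne s i j v (fun e => hji e.symm),
      hji, decide_eq_true_eq]

lemma f_py_eq (s : List Int) : f_py s = FF s := by
  unfold f_py FF
  rw [PySem.List.pyRange_zero_nat, List.foldl_map, PySem.List.foldl_if_add_one, zero_add]
  congr 1
  apply List.countP_congr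
  intro i hi
  rw [List.mem_range] at hi
  have hpoint : ∀ j : Nat, (((j : Int) != (i : Int)) &&
      ((PySem.List.pyGetD s (i : Int) 0 - PySem.List.pyGetD s (j : Int) 0).natAbs ==
          ((i : Int) - (j : Int)).natAbs
        || PySem.List.pyGetD s (i : Int) 0 == PySem.List.pyGetD s (j : Int) 0))
      = (decide (j ≠ i) && confN s i j) := by
    intro j
    rw [Bool.eq_iff_iff]
    simp only [PySem.List.pyGetD_natCast, Bool.and_eq_true, Bool.or_eq_true, bne_iff_ne,
      ne_eq, Nat.cast_inj, decide_eq_true_eq, confN, conflict_alt, beq_iff_eq]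
    tauto
  rw [List.any_map]
  simp only [Function.comp_def, hpoint]
  simp only [flagb, rowc, decide_eq_true_eq]
  rw [Int.natCast_pos, List.countP_pos_iff, List.any_eq_true]

lemma fmove_eq (s : List Int) (i : Nat) (v : Int) (hi : i < s.length) :
    fmove s ((List.range s.length).map (fun k => rowc s k)) (i : Int) v = f_py (s.set i v) := by
  unfold fmove
  rw [PySem.List.pyRange_zero_nat, List.foldl_map]
  have hbody : ∀ (p : Int × Int), ∀ k ∈ List.range s.length,
      (fun (p : Int × Int) (k' : Int) =>
        if k' == (i : Int) then p
        else
          let ck := PySem.List.pyGetD ((List.range s.length).map (fun k => rowc s k)) k' 0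
                    - (if conflict_alt (PySem.List.pyGetD s k' 0) k' (PySem.List.pyGetD s (i : Int) 0) (i : Int) then 1 else 0)
                    + (if conflict_alt (PySem.List.pyGetD s k' 0) k' v (i : Int) then 1 else 0)
          ((if 0 < ck then p.1 + 1 else p.1),
           (if conflict_alt v (i : Int) (PySem.List.pyGetD s k' 0) k' then p.2 + 1 else p.2))) p (k : Int)
      = ((if (decide (k ≠ i) && decide (0 < rowc s k - (if confN s k i then 1 else 0)
              + (if conflict_alt (s.getD k 0) (k : Int) v (i : Int) then 1 else 0))) then p.1 + 1 else p.1),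
         (if (decide (k ≠ i) && conflict_alt v (i : Int) (s.getD k 0) (k : Int)) then p.2 + 1 else p.2)) := by
    intro p k hk
    rw [List.mem_range] at hk
    by_cases hki : k = i
    · subst hki
      simp
    · have hc : ((k : Int) == (i : Int)) = false := by
        simp [hki]
      simp only [hc, Bool.false_eq_true, if_false]
      have hcget : PySem.List.pyGetD ((List.range s.length).map (fun k => rowc s k)) (k : Int) 0
          = rowc s k := by
        rw [PySem.List.pyGetD_natCast, PySem.List.getD_map_range _ _ _ _ hk]
      simp only [hcget, PySem.List.pyGetD_natCast, hki, ne_eq, not_false_iff, decide_true,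
        Bool.true_and, confN, decide_eq_true_eq]
      rfl
  dsimp only
  rw [PySem.List.foldl_congr_mem _ _ _ _ hbody]
  rw [PySem.List.foldl_prod_mk
    (fun a k => if (decide (k ≠ i) && decide (0 < rowc s k - (if confN s k i then 1 else 0)
        + (if conflict_alt (s.getD k 0) (k : Int) v (i : Int) then 1 else 0))) then a + 1 else a)
    (fun a k => if (decide (k ≠ i) && conflict_alt v (i : Int) (s.getD k 0) (k : Int)) then a + 1 else a)
    (List.range s.length) 0 0]
  rw [PySem.List.foldl_if_add_one, PySem.List.foldl_if_add_one, zero_add, zero_add]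
  rw [f_py_eq]
  unfold FF
  rw [List.length_set]
  rw [countP_split (List.range s.length) i (flagb (s.set i v))
        (List.mem_range.mpr hi) List.nodup_range]
  have e1 : (List.range s.length).countP (fun k => decide (k ≠ i) && flagb (s.set i v) k)
      = (List.range s.length).countP (fun k => decide (k ≠ i) && decide (0 < rowc s k
          - (if confN s k i then 1 else 0)
          + (if conflict_alt (s.getD k 0) (k : Int) v (i : Int) then 1 else 0))) := by
    apply List.countP_congr
    intro k hk
    rw [List.mem_range] at hk
    by_cases hki : k = i
    · simp [hki]
    · simp only [hki, ne_eq, not_false_iff, decide_true, Bool.true_and, flagb]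
      rw [rowc_set_ne s i k v hki hi hk]
  have e2 : flagb (s.set i v) i
      = decide (0 < ((List.range s.length).countP
          (fun k => decide (k ≠ i) && conflict_alt v (i : Int) (s.getD k 0) (k : Int)) : Int)) := by
    simp only [flagb]
    rw [rowc_set_self s i v hi]
  rw [e1, e2]
  by_cases hpos : 0 < ((List.range s.length).countP
      (fun k => decide (k ≠ i) && conflict_alt v (i : Int) (s.getD k 0) (k : Int)) : Int)
  · rw [if_pos hpos, decide_eq_true hpos, if_pos rfl]
  · rw [if_neg hpos, decide_eq_false hpos]
    simp
def kle (x y : List Int) : Prop := f_py x < f_py y ∨ (f_py x = f_py y ∧ x ≤ y)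

def IsBest (C : List (List Int)) (r : List Int) : Prop := r ∈ C ∧ ∀ x ∈ C, kle r x

def pairStep (b : List Int × Int) (x : List Int) : List Int × Int :=
  if f_py x < b.2 then (x, f_py x) else b

def genStep (b : List Int × Int) (x : List Int) : List Int × Int :=
  if f_py x < b.2 || (f_py x == b.2 && decide (x < b.1)) then (x, f_py x) else b

lemma kle_refl (x : List Int) : kle x x := Or.inr ⟨rfl, le_refl x⟩

lemma kle_trans {x y z : List Int} (h1 : kle x y) (h2 : kle y z) : kle x z := by
  rcases h1 with h1 | ⟨e1, l1⟩ <;> rcases h2 with h2 | ⟨e2, l2⟩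
  · exact Or.inl (h1.trans h2)
  · exact Or.inl (e2 ▸ h1)
  · exact Or.inl (e1 ▸ h2)
  · exact Or.inr ⟨e1.trans e2, le_trans l1 l2⟩

lemma best_unique {C : List (List Int)} {r r' : List Int}
    (h1 : IsBest C r) (h2 : IsBest C r') : r = r' := by
  have a1 := h1.2 r' h2.1
  have a2 := h2.2 r h1.1
  rcases a1 with a1 | ⟨e1, l1⟩ <;> rcases a2 with a2 | ⟨e2, l2⟩
  · omega
  · omega
  · omega
  · exact le_antisymm l1 l2

lemma IsBest_congr {C C' : List (List Int)} {r : List Int}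
    (h : ∀ x, x ∈ C ↔ x ∈ C') (hb : IsBest C r) : IsBest C' r :=
  ⟨(h r).mp hb.1, fun x hx => hb.2 x ((h x).mpr hx)⟩

lemma scan_best : ∀ (t : List (List Int)) (b : List Int),
    (b :: t).Pairwise (· ≤ ·) →
    IsBest (b :: t) ((t.foldl pairStep (b, f_py b)).1) := by
  intro t
  induction t with
  | nil =>
    intro b _
    exact ⟨List.mem_singleton.mpr rfl, fun x hx => by
      rw [List.mem_singleton] at hx; subst hx; exact kle_refl _⟩
  | cons x t' ih =>
    intro b h
    rw [List.foldl_cons]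
    have hbx : b ≤ x := (List.pairwise_cons.mp h).1 x (List.mem_cons_self)
    have htail : (x :: t').Pairwise (· ≤ ·) := (List.pairwise_cons.mp h).2
    by_cases hlt : f_py x < f_py b
    · have hstep : pairStep (b, f_py b) x = (x, f_py x) := by
        unfold pairStep; rw [if_pos hlt]
      rw [hstep]
      have ⟨m1, m2⟩ := ih x htail
      refine ⟨List.mem_cons_of_mem b m1, ?_⟩
      intro y hy
      rcases List.mem_cons.mp hy with rfl | hy'
      · have hrx := m2 x List.mem_cons_self
        have : f_py (t'.foldl pairStep (x, f_py x)).1 ≤ f_py x := by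
          rcases hrx with h' | ⟨e', _⟩
          · exact le_of_lt h'
          · exact le_of_eq e'
        exact Or.inl (lt_of_le_of_lt this hlt)
      · exact m2 y hy'
    · have hstep : pairStep (b, f_py b) x = (b, f_py b) := by
        unfold pairStep; rw [if_neg hlt]
      rw [hstep]
      have hble : f_py b ≤ f_py x := le_of_not_gt hlt
      have hbt' : (b :: t').Pairwise (· ≤ ·) := by
        rw [List.pairwise_cons]
        exact ⟨fun y hy => (List.pairwise_cons.mp h).1 y (List.mem_cons_of_mem x hy),
          (List.pairwise_cons.mp htail).2⟩
      have ⟨m1, m2⟩ := ih b hbt'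
      refine ⟨?_, ?_⟩
      · rcases List.mem_cons.mp m1 with e | m1'
        · rw [e]; exact List.mem_cons_self
        · exact List.mem_cons_of_mem b (List.mem_cons_of_mem x m1')
      · intro y hy
        rcases List.mem_cons.mp hy with e | hy'
        · rw [e]; exact m2 b List.mem_cons_self
        · rcases List.mem_cons.mp hy' with e2 | hy''
          · have key : kle (t'.foldl pairStep (b, f_py b)).1 x := by
              have hrb := m2 b List.mem_cons_self
              rcases hrb with h' | ⟨e', l'⟩
              · exact Or.inl (lt_of_lt_of_le h' hble)
              · by_cases hfx : f_py b < f_py x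
                · exact Or.inl (by rw [e']; exact hfx)
                · have e3 : f_py b = f_py x := le_antisymm hble (le_of_not_gt hfx)
                  exact Or.inr ⟨e'.trans e3, le_trans l' hbx⟩
            rw [e2]; exact key
          · exact m2 y (List.mem_cons_of_mem b hy'')

lemma fold_best : ∀ (C : List (List Int)) (b : List Int),
    IsBest (b :: C) ((C.foldl genStep (b, f_py b)).1) := by
  intro C
  induction C with
  | nil =>
    intro b
    exact ⟨List.mem_singleton.mpr rfl, fun x hx => by
      rw [List.mem_singleton] at hx; subst hx; exact kle_refl _⟩
  | cons x C' ih =>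
    intro b
    rw [List.foldl_cons]
    by_cases hc : f_py x < f_py b ∨ (f_py x = f_py b ∧ x < b)
    · have hstep : genStep (b, f_py b) x = (x, f_py x) := by
        unfold genStep
        have : (f_py x < f_py b || (f_py x == f_py b && decide (x < b))) = true := by
          simp only [Bool.or_eq_true, Bool.and_eq_true, beq_iff_eq, decide_eq_true_eq]
          exact hc
        simp only [this, if_true]
      rw [hstep]
      have hxb : kle x b := by
        rcases hc with h' | ⟨e', l'⟩
        · exact Or.inl h'
        · exact Or.inr ⟨e', le_of_lt l'⟩
      have ⟨m1, m2⟩ := ih x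
      refine ⟨List.mem_cons_of_mem b m1, ?_⟩
      intro y hy
      rcases List.mem_cons.mp hy with e | hy'
      · rw [e]
        exact kle_trans (m2 x List.mem_cons_self) hxb
      · exact m2 y hy'
    · have hstep : genStep (b, f_py b) x = (b, f_py b) := by
        unfold genStep
        have : (f_py x < f_py b || (f_py x == f_py b && decide (x < b))) = false := by
          simp only [Bool.or_eq_false_iff, Bool.and_eq_false_iff]
          push_neg at hc
          constructor
          · simp only [decide_eq_false_iff_not]
            exact fun h => absurd h (by intro h'; exact absurd h' (by simpa using hc.1))
          · by_cases he : f_py x = f_py b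
            · right
              simp only [decide_eq_false_iff_not]
              exact not_lt.mpr (hc.2 he)
            · left
              simp [he]
        simp only [this, Bool.false_eq_true, if_false]
      rw [hstep]
      have hbx : kle b x := by
        by_cases he : f_py x = f_py b
        · push_neg at hc
          exact Or.inr ⟨he.symm, hc.2 he⟩
        · push_neg at hc
          rcases lt_trichotomy (f_py b) (f_py x) with h' | h' | h'
          · exact Or.inl h'
          · exact absurd h'.symm he
          · exact absurd h' (not_lt.mpr hc.1)
      have ⟨m1, m2⟩ := ih b
      refine ⟨?_, ?_⟩
      · rcases List.mem_cons.mp m1 with e | m1'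
        · rw [e]; exact List.mem_cons_self
        · exact List.mem_cons_of_mem b (List.mem_cons_of_mem x m1')
      · intro y hy
        rcases List.mem_cons.mp hy with e | hy'
        · rw [e]; exact m2 b List.mem_cons_self
        · rcases List.mem_cons.mp hy' with e2 | hy''
          · rw [e2]
            exact kle_trans (m2 b List.mem_cons_self) hbx
          · exact m2 y (List.mem_cons_of_mem b hy'')

def fListStep (fl : List (List Int × Int)) (x : List Int) : List (List Int × Int) :=
  if f_py x < (PySem.List.pyGetD fl 0 ([], 0)).2 then (x, f_py x) :: fl else fl

lemma fList_head : ∀ (t : List (List Int)) (b : List Int × Int) (fl : List (List Int × Int)),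
    PySem.List.pyGetD (t.foldl fListStep (b :: fl)) 0 ([], 0) = t.foldl pairStep b := by
  intro t
  induction t with
  | nil =>
    intro b fl
    simp [PySem.List.pyGetD_zero_cons]
  | cons x t' ih =>
    intro b fl
    rw [List.foldl_cons, List.foldl_cons]
    unfold fListStep pairStep
    rw [PySem.List.pyGetD_zero_cons]
    by_cases hx : f_py x < b.2
    · rw [if_pos hx, if_pos hx]
      exact ih (x, f_py x) (b :: fl)
    · rw [if_neg hx, if_neg hx]
      exact ih b fl

def movesL (s : List Int) (sx : Int) : List (List Int) :=
  (List.range s.length).flatMap (fun (i : Nat) =>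
    if (i : Int) == sx then []
    else
      (if s.getD i 0 + 1 ≠ (s.length : Int) then [s.set i (s.getD i 0 + 1)] else []) ++
      (if s.getD i 0 - 1 ≠ -1 then [s.set i (s.getD i 0 - 1)] else []))

lemma sorted_pairwise_le' (xs : List (List Int)) :
    (PySem.List.sorted xs (fun x => x)).Pairwise (· ≤ ·) := by
  have h : (PySem.List.sorted xs (fun x => x) : List (List Int)) =
      @PySem.List.sorted _ _ List.instLinearOrder.toLT LinearOrder.toDecidableLT xs (fun x => x) false := by
    congr 1
  rw [h]
  exact PySem.List.sorted_pairwise xs (fun x => x)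

lemma succ_fold_eq (s : List Int) (sx : Int) :
    (PySem.List.pyRange 0 s.length 1).foldl (fun acc i =>
        if i == sx then acc
        else
          let acc := if PySem.List.pyGetD s i 0 + 1 ≠ (s.length : Int)
                     then acc ++ [PySem.List.pySetD s i (PySem.List.pyGetD s i 0 + 1)]
                     else acc
          if PySem.List.pyGetD s i 0 - 1 ≠ -1
          then acc ++ [PySem.List.pySetD s i (PySem.List.pyGetD s i 0 - 1)]
          else acc) []
    = movesL s sx := by
  rw [PySem.List.pyRange_zero_nat, List.foldl_map]
  have hbody : ∀ (acc : List (List Int)), ∀ i ∈ List.range s.length,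
      (fun (acc : List (List Int)) (i' : Int) =>
        if i' == sx then acc
        else
          let acc := if PySem.List.pyGetD s i' 0 + 1 ≠ (s.length : Int)
                     then acc ++ [PySem.List.pySetD s i' (PySem.List.pyGetD s i' 0 + 1)]
                     else acc
          if PySem.List.pyGetD s i' 0 - 1 ≠ -1
          then acc ++ [PySem.List.pySetD s i' (PySem.List.pyGetD s i' 0 - 1)]
          else acc) acc (i : Int)
      = acc ++ (if (i : Int) == sx then []
        else
          (if s.getD i 0 + 1 ≠ (s.length : Int) then [s.set i (s.getD i 0 + 1)] else []) ++
          (if s.getD i 0 - 1 ≠ -1 then [s.set i (s.getD i 0 - 1)] else [])) := by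
    intro acc i _
    simp only [PySem.List.pyGetD_natCast, PySem.List.pySetD_natCast]
    by_cases hsx : ((i : Int) == sx) = true
    · simp [hsx]
    · rw [Bool.not_eq_true] at hsx
      simp only [hsx, Bool.false_eq_true, if_false]
      by_cases h1 : s.getD i 0 + 1 ≠ (s.length : Int) <;>
        by_cases h2 : s.getD i 0 - 1 ≠ -1
      · rw [if_pos h1, if_pos h2, if_pos h1, if_pos h2, List.append_assoc]
      · rw [if_pos h1, if_neg h2, if_pos h1, if_neg h2, List.append_nil]
      · rw [if_neg h1, if_pos h2, if_neg h1, if_pos h2, List.nil_append]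
      · rw [if_neg h1, if_neg h2, if_neg h1, if_neg h2, List.append_nil, List.append_nil]
  rw [PySem.List.foldl_congr_mem _ _ _ _ hbody]
  rw [PySem.List.foldl_append_eq_flatMap]
  rw [List.nil_append]
  rfl

lemma succ_py_eq (s : List Int) (sx sy v : Int)
    (hget : PySem.List.pyGet? s sx = some v) (hv : v = sy) :
    succ_py s sx sy = PySem.List.sorted (movesL s sx) (fun x => x) := by
  unfold succ_py
  rw [hget]
  simp only [hv, ne_eq, not_true_eq_false, if_false]
  rw [succ_fold_eq]

lemma choose_next_isBest (curr : List Int) (sx sy v : Int)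
    (hget : PySem.List.pyGet? curr sx = some v) (hv : v = sy) :
    ∃ r, choose_next curr sx sy = some r ∧ IsBest (curr :: movesL curr sx) r := by
  subst hv
  unfold choose_next
  rw [hget]
  simp only [ne_eq, not_true_eq_false, if_false]
  rw [succ_py_eq curr sx v v hget rfl]
  set L := PySem.List.sorted (PySem.List.sorted (movesL curr sx) (fun x => x) ++ [curr])
      (fun x => x) with hL
  have hlen : L.length = (PySem.List.sorted (movesL curr sx) (fun x => x)).length + 1 := by
    rw [hL, PySem.List.length_sorted, List.length_append, List.length_cons, List.length_nil]
  obtain ⟨m, t, hmt⟩ : ∃ m t, L = m :: t := by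
    cases hLc : L with
    | nil => rw [hLc] at hlen; simp at hlen
    | cons a l => exact ⟨a, l, rfl⟩
  have hpair : (m :: t).Pairwise (· ≤ ·) := by
    rw [← hmt, hL]
    exact sorted_pairwise_le' _
  have hconv : ∀ (init : List (List Int × Int)),
      ((PySem.List.pyRange 1 (L.length : Int) 1).foldl (fun fl i =>
        if f_py (PySem.List.pyGetD L i []) < (PySem.List.pyGetD fl 0 ([], 0)).2
        then (PySem.List.pyGetD L i [], f_py (PySem.List.pyGetD L i [])) :: fl
        else fl) init) = (L.drop 1).foldl fListStep init := by
    intro init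
    rw [show (fun (fl : List (List Int × Int)) (i : Int) =>
        if f_py (PySem.List.pyGetD L i []) < (PySem.List.pyGetD fl 0 ([], 0)).2
        then (PySem.List.pyGetD L i [], f_py (PySem.List.pyGetD L i [])) :: fl
        else fl) = (fun fl i => fListStep fl (PySem.List.pyGetD L i [])) from rfl]
    exact PySem.List.foldl_pyRange_pyGetD' L [] fListStep init (by norm_num)
  rw [hconv]
  rw [hmt]
  simp only [List.drop_succ_cons, List.drop_zero, PySem.List.pyGetD_zero_cons]
  rw [fList_head t (m, f_py m) []]
  refine ⟨(t.foldl pairStep (m, f_py m)).1, rfl, ?_⟩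
  have hbest := scan_best t m hpair
  apply IsBest_congr _ hbest
  intro x
  rw [← hmt, hL]
  rw [PySem.List.mem_sorted]
  rw [List.mem_append, PySem.List.mem_sorted, List.mem_singleton, List.mem_cons]
  tauto

lemma choose_next_alt_isBest (curr : List Int) (sx sy v : Int)
    (hget : PySem.List.pyGet? curr sx = some v) (hv : v = sy) :
    ∃ r, choose_next_alt curr sx sy = some r ∧ IsBest (curr :: movesL curr sx) r := by
  subst hv
  unfold choose_next_alt
  rw [hget]
  simp only [ne_eq, not_true_eq_false, if_false]
  have hbne : ∀ (j i : Nat), (((j : Nat) : Int) != ((i : Nat) : Int)) = decide (j ≠ i) := by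
    intro j i
    rw [Bool.eq_iff_iff]
    simp [Nat.cast_inj]
  have hc : ((PySem.List.pyRange 0 (curr.length : Int) 1).map (fun i =>
        ((PySem.List.pyRange 0 (curr.length : Int) 1).countP (fun j =>
          j != i && conflict_alt (PySem.List.pyGetD curr i 0) i (PySem.List.pyGetD curr j 0) j) : Int)))
      = (List.range curr.length).map (fun k => rowc curr k) := by
    rw [PySem.List.pyRange_zero_nat, List.map_map]
    apply List.map_congr_left
    intro i _
    simp only [Function.comp_def]
    unfold rowc
    congr 1
    rw [List.countP_map]
    apply List.countP_congr
    intro j _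
    simp only [Function.comp_def, PySem.List.pyGetD_natCast, hbne j i, confN]
  rw [hc]
  have hf0 : ((((List.range curr.length).map (fun k => rowc curr k)).countP
      (fun x => decide (0 < x)) : Nat) : Int) = f_py curr := by
    rw [List.countP_map, f_py_eq]
    rfl
  rw [hf0]
  have hbody : ∀ (best : List Int × Int), ∀ i ∈ List.range curr.length,
      (fun (best : List Int × Int) (i' : Int) =>
        if i' == sx then best
        else
          [(PySem.List.pyGetD curr i' 0 + 1, (curr.length : Int)),
           (PySem.List.pyGetD curr i' 0 - 1, (-1 : Int))].foldl
            (fun best vb =>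
              if vb.1 == vb.2 then best
              else
                let fi := fmove curr ((List.range curr.length).map (fun k => rowc curr k)) i' vb.1
                let cand := PySem.List.pySetD curr i' vb.1
                if fi < best.2 || (fi == best.2 && decide (cand < best.1)) then (cand, fi)
                else best)
            best) best (i : Int)
      = ((if (i : Int) == sx then []
          else
            (if curr.getD i 0 + 1 ≠ (curr.length : Int) then [curr.set i (curr.getD i 0 + 1)] else []) ++
            (if curr.getD i 0 - 1 ≠ -1 then [curr.set i (curr.getD i 0 - 1)] else [])).foldl
          genStep best) := by
    intro best i hi
    rw [List.mem_range] at hi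
    by_cases hsx : ((i : Int) == sx) = true
    · simp [hsx]
    · rw [Bool.not_eq_true] at hsx
      simp only [hsx, Bool.false_eq_true, if_false]
      rw [List.foldl_cons, List.foldl_cons, List.foldl_nil]
      dsimp only
      rw [fmove_eq curr i _ hi, fmove_eq curr i _ hi]
      simp only [PySem.List.pyGetD_natCast, PySem.List.pySetD_natCast]
      by_cases h1 : (curr[i]?.getD 0 : Int) + 1 = (curr.length : Int) <;>
        by_cases h2 : (curr[i]?.getD 0 : Int) = 0
      · simp [genStep, h1, h2, show (1:Int) = (curr.length:Int) by omega]
      · simp [genStep, h1, h2]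
      · simp [genStep, h1, h2, show ¬((1:Int) = (curr.length:Int)) by omega]
      · simp [genStep, h1, h2]
  rw [PySem.List.pyRange_zero_nat, List.foldl_map]
  rw [PySem.List.foldl_congr_mem _ _ _ _ hbody]
  rw [← List.foldl_flatMap]
  refine ⟨_, rfl, ?_⟩
  exact fold_best (movesL curr sx) curr

-- ===== VERDICT (by name: the statement is the Claim_ definition above) =====
theorem choose_next_spec : Claim_equal_choose_next := by
  intro curr sx sy _ hpre
  unfold Spec_choose_next
  cases hget : PySem.List.pyGet? curr sx with
  | none =>
    rw [PySem.List.pyGet?_eq_none_iff] at hget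
    exact absurd ⟨hpre.1, hpre.2⟩ hget
  | some v =>
    by_cases hv : v = sy
    · obtain ⟨r1, e1, b1⟩ := choose_next_isBest curr sx sy v hget hv
      obtain ⟨r2, e2, b2⟩ := choose_next_alt_isBest curr sx sy v hget hv
      rw [e1, e2, best_unique b1 b2]
    · unfold choose_next choose_next_alt
      rw [hget]
      simp [hv]
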